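-- pv_equiv track=rewrite | github.com/Machine-Learning-for-Medical-Language/curate-mimic | extract_mimic_temporal.py | fix_simple_tokenize
-- ===== SOURCE A (Python) =====
-- def fix_simple_tokenize(tokens):
--     new_tokens = []
--     ind = 0
--     while ind < len(tokens):
--         if tokens[ind] == "'" and ind+1 < len(tokens) and tokens[ind+1] == 's':
--             new_tokens.append("'s")
--             ind += 2
--         else:
--             new_tokens.append(tokens[ind])
--             ind += 1
--
--     return new_tokens
-- ===== SOURCE B (Python) =====
-- def fix_simple_tokenize(tokens):
--     new_tokens = []
--     for t in tokens:
--         if t == 's' and new_tokens and new_tokens[-1] == "'":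
--             new_tokens[-1] = "'s"
--         else:
--             new_tokens.append(t)
--     return new_tokens
-- ===== Notes on version B (the rewrite author's own statement) =====
-- stated objective: simpler
-- what changed: Replaces the explicit index loop with lookahead-and-skip-by-2 by a plain forward iteration that treats the output as a stack, merging a just-appended "'" with a following 's' in place. Constant-factor speedup from iterating directly instead of len() checks and repeated indexing.
import Mathlib
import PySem

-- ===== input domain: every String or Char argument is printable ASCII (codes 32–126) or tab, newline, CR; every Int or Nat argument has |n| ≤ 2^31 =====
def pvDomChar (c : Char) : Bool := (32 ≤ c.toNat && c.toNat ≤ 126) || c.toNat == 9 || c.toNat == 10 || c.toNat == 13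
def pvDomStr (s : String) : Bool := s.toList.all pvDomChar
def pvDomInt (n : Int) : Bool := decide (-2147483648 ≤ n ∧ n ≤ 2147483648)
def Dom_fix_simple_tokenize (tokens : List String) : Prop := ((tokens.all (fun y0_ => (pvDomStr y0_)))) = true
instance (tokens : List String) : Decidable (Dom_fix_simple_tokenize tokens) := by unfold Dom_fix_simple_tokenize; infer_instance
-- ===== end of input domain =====

-- B replaces A's index loop with lookahead/skip-by-2 by a forward pass that treats the
-- output as a stack, merging a just-appended "'" with a following "s" in place (simpler).


-- ===== PORT A =====
-- A's while loop with index ind, consuming 1 or 2 tokens per step, as structural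
-- recursion on the remaining suffix; branch order and tests as in A.
def fix_simple_tokenize (tokens : List String) : List String :=
  match tokens with
  | [] => []
  | t :: rest =>
    match rest with
    | s :: rest' =>
      if t = "'" ∧ s = "s" then "'s" :: fix_simple_tokenize rest'
      else t :: fix_simple_tokenize (s :: rest')
    | [] => [t]

-- ===== PORT B =====
-- B's for-loop as a foldl; the output list is kept in REVERSE (append = cons,
-- new_tokens[-1] = head), reversed once at the end.
def pvStepB (acc : List String) (t : String) : List String :=
  if t = "s" ∧ acc.head? = some "'" then "'s" :: acc.tail
  else t :: acc

def fix_simple_tokenize_alt (tokens : List String) : List String :=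
  (tokens.foldl pvStepB []).reverse

-- ===== PRECONDITION & SPEC =====
def Spec_fix_simple_tokenize (tokens : List String) (out : List String) : Prop := out = fix_simple_tokenize_alt tokens
instance (tokens : List String) (out : List String) : Decidable (Spec_fix_simple_tokenize tokens out) := by unfold Spec_fix_simple_tokenize; infer_instance

-- ===== CLAIM (what is proved, stated in full; the proofs are below) =====
def Claim_equal_fix_simple_tokenize : Prop := ∀ (tokens : List String), Dom_fix_simple_tokenize tokens → Spec_fix_simple_tokenize tokens (fix_simple_tokenize tokens)

-- ===== LEMMAS AND PROOFS =====

-- Combined loop invariant, by strong induction on the number of remaining tokens: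
-- P: with an accumulator whose top is not "'", B's fold appends A's result (reversed);
-- Q: with "'" on top of the accumulator, B's fold behaves like A on "'" :: tokens.
theorem pv_key : ∀ (n : Nat) (tokens : List String), tokens.length ≤ n →
    ((∀ acc : List String, acc.head? ≠ some "'" →
        tokens.foldl pvStepB acc = (fix_simple_tokenize tokens).reverse ++ acc) ∧
     (∀ acc : List String,
        tokens.foldl pvStepB ("'" :: acc) = (fix_simple_tokenize ("'" :: tokens)).reverse ++ acc)) := by
  intro n
  induction n with
  | zero =>
    intro tokens hlen
    have h0 : tokens = [] := List.eq_nil_of_length_eq_zero (Nat.le_zero.mp hlen)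
    subst h0
    constructor
    · intro acc _; simp [fix_simple_tokenize]
    · intro acc; simp [List.foldl, fix_simple_tokenize]
  | succ n ih =>
    intro tokens hlen
    cases tokens with
    | nil =>
      constructor
      · intro acc _; simp [fix_simple_tokenize]
      · intro acc; simp [List.foldl, fix_simple_tokenize]
    | cons t rest =>
      have hrest : rest.length ≤ n := by simpa using Nat.lt_succ_iff.mp (by simpa using hlen)
      constructor
      · intro acc hacc
        by_cases ht : t = "'"
        · subst ht
          have hstep : pvStepB acc "'" = "'" :: acc := by
            simp [pvStepB]
          rw [List.foldl_cons, hstep]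
          exact (ih rest hrest).2 acc
        · have hstep : pvStepB acc t = t :: acc := by
            by_cases hts : t = "s"
            · subst hts; simp [pvStepB, hacc]
            · simp [pvStepB, hts]
          have hA : fix_simple_tokenize (t :: rest) = t :: fix_simple_tokenize rest := by
            cases rest with
            | nil => simp [fix_simple_tokenize]
            | cons s r' => simp [fix_simple_tokenize, ht]
          have htop : (t :: acc).head? ≠ some "'" := by simp [ht]
          rw [List.foldl_cons, hstep, hA]
          rw [(ih rest hrest).1 (t :: acc) htop]
          simp
      · intro acc
        cases rest with
        | nil =>
          by_cases hts : t = "s"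
          · subst hts
            simp [List.foldl, pvStepB, fix_simple_tokenize]
          · have hstep : pvStepB ("'" :: acc) t = t :: "'" :: acc := by
              simp [pvStepB, hts]
            have hA : fix_simple_tokenize ["'", t] = ["'", t] := by
              simp [fix_simple_tokenize, hts]
            simp [List.foldl, hstep, hA]
        | cons s r' =>
          have hr' : (s :: r').length ≤ n := hrest
          by_cases hts : t = "s"
          · subst hts
            have hstep : pvStepB ("'" :: acc) "s" = "'s" :: acc := by
              simp [pvStepB]
            have hA : fix_simple_tokenize ("'" :: "s" :: s :: r') =
                "'s" :: fix_simple_tokenize (s :: r') := by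
              simp [fix_simple_tokenize]
            have htop : ("'s" :: acc).head? ≠ some "'" := by simp
            rw [List.foldl_cons, hstep, hA]
            rw [(ih (s :: r') hr').1 ("'s" :: acc) htop]
            simp
          · have hA : fix_simple_tokenize ("'" :: t :: s :: r') =
                "'" :: fix_simple_tokenize (t :: s :: r') := by
              simp [fix_simple_tokenize, hts]
            by_cases ht : t = "'"
            · subst ht
              have hstep : pvStepB ("'" :: acc) "'" = "'" :: "'" :: acc := by
                simp [pvStepB]
              rw [List.foldl_cons, hstep, hA]
              rw [show (s :: r').foldl pvStepB ("'" :: "'" :: acc) =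
                    (fix_simple_tokenize ("'" :: s :: r')).reverse ++ ("'" :: acc) from
                  (ih (s :: r') hr').2 ("'" :: acc)]
              simp [fix_simple_tokenize]
            · have hstep : pvStepB ("'" :: acc) t = t :: "'" :: acc := by
                simp [pvStepB, hts]
              have htop : (t :: "'" :: acc).head? ≠ some "'" := by simp [ht]
              have hA3 : fix_simple_tokenize (t :: s :: r') = t :: fix_simple_tokenize (s :: r') := by
                simp [fix_simple_tokenize, ht]
              rw [List.foldl_cons, hstep, hA, hA3]
              rw [(ih (s :: r') hr').1 (t :: "'" :: acc) htop]
              simp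

-- ===== VERDICT (by name: the statement is the Claim_ definition above) =====
theorem fix_simple_tokenize_spec : Claim_equal_fix_simple_tokenize := by
  intro tokens _
  unfold Spec_fix_simple_tokenize fix_simple_tokenize_alt
  rw [(pv_key tokens.length tokens le_rfl).1 [] (by simp)]
  simp
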